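-- pv_equiv track=rewrite | github.com/portfolio-AB/pygame | homework/clicker task.py | how_many_clicks
-- ===== SOURCE A (Python) =====
-- def how_many_clicks(txt):
--     total_clicks = 0
--     alpha = "abcdefghijklmnopqrstuvwxyz"
--     click_val = {}
--     for i in range(len(alpha)):
--         click_val[alpha[i]] = i + 1
--
--     for i in range(len(txt)):
--         if txt[i] in click_val:
--             total_clicks += click_val[txt[i]]
--
--     return total_clicks
-- ===== SOURCE B (Python) =====
-- def how_many_clicks(txt):
--     freq = {}
--     for ch in txt:
--         freq[ch] = freq.get(ch, 0) + 1
--     total = 0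
--     for ch, n in freq.items():
--         if 'a' <= ch <= 'z':
--             total += (ord(ch) - 96) * n
--     return total
-- ===== Notes on version B (the rewrite author's own statement) =====
-- stated objective: alternative
-- what changed: B builds a frequency table of the text in one pass and then sums (ord(ch)-96)*count over the distinct characters in the a-z range, instead of A's pass over every text position with a prebuilt letter-to-value dict.
import Mathlib
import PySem

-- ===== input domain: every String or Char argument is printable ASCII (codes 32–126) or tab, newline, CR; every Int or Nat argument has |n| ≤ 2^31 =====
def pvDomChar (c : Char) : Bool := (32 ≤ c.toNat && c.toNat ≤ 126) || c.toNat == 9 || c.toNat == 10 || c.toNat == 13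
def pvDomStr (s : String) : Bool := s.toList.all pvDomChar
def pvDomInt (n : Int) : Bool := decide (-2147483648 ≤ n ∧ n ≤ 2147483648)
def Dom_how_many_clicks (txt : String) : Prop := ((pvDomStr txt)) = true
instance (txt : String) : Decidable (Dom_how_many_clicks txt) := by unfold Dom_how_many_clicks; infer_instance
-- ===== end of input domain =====

-- B counts each character once and sums (ord(ch)-96)*count over the distinct a-z letters,
-- instead of A's per-position scan against a prebuilt letter->value dict; alternative decomposition.

-- ===== PORT A =====
def how_many_clicks (txt : String) : Int :=
  let alpha := "abcdefghijklmnopqrstuvwxyz"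
  -- click_val[alpha[i]] = i + 1  (alpha[i] is always in range, so pyGetD's unused default is exact)
  let click_val : PySem.Dict Char Int :=
    (PySem.List.pyRange 0 (PySem.Str.len alpha) 1).foldl
      (fun d i => d.insert (PySem.List.pyGetD alpha.toList i ' ') (i + 1)) PySem.Dict.empty
  (PySem.List.pyRange 0 (PySem.Str.len txt) 1).foldl
    (fun total i =>
      if click_val.contains (PySem.List.pyGetD txt.toList i ' ') then
        total + click_val.getD (PySem.List.pyGetD txt.toList i ' ') 0
      else total) 0

-- ===== PORT B =====
def how_many_clicks_alt (txt : String) : Int :=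
  let freq : PySem.Dict Char Int :=
    txt.toList.foldl (fun d ch => d.insert ch (d.getD ch 0 + 1)) PySem.Dict.empty
  freq.items.foldl
    (fun total p =>
      if 'a' ≤ p.1 ∧ p.1 ≤ 'z' then total + ((p.1.toNat : Int) - 96) * p.2 else total) 0

-- ===== PRECONDITION & SPEC =====
def Spec_how_many_clicks (txt : String) (out : Int) : Prop := out = how_many_clicks_alt txt
instance (txt : String) (out : Int) : Decidable (Spec_how_many_clicks txt out) := by unfold Spec_how_many_clicks; infer_instance

-- ===== CLAIM (what is proved, stated in full; the proofs are below) =====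
def Claim_equal_how_many_clicks : Prop := ∀ (txt : String), Dom_how_many_clicks txt → Spec_how_many_clicks txt (how_many_clicks txt)

-- ===== LEMMAS AND PROOFS =====

-- the per-character value both programs assign
def pvVal (c : Char) : Int := if 97 ≤ c.toNat ∧ c.toNat ≤ 122 then (c.toNat : Int) - 96 else 0

-- A's click_val dict, as built by A's first loop
def pvClickVal : PySem.Dict Char Int :=
  (PySem.List.pyRange 0 (PySem.Str.len "abcdefghijklmnopqrstuvwxyz") 1).foldl
    (fun d i => d.insert (PySem.List.pyGetD "abcdefghijklmnopqrstuvwxyz".toList i ' ') (i + 1)) PySem.Dict.empty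

lemma pvContains_false_of (l : List (Char × Int)) (c : Char)
    (h : ∀ p ∈ l, p.1.toNat ≠ c.toNat) : (PySem.Dict.mk l).contains c = false := by
  rw [PySem.Dict.contains_mk, List.any_eq_false]
  intro p hp
  simp only [beq_iff_eq]
  exact fun he => h p hp (congrArg Char.toNat he)

lemma pvClickVal_lit : pvClickVal = PySem.Dict.mk
    [('a',1),('b',2),('c',3),('d',4),('e',5),('f',6),('g',7),('h',8),('i',9),('j',10),
     ('k',11),('l',12),('m',13),('n',14),('o',15),('p',16),('q',17),('r',18),('s',19),('t',20),
     ('u',21),('v',22),('w',23),('x',24),('y',25),('z',26)] := by decide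

set_option maxHeartbeats 1000000 in
lemma pvStep (total : Int) (c : Char) :
    (if pvClickVal.contains c then total + pvClickVal.getD c 0 else total) = total + pvVal c := by
  rw [pvClickVal_lit]
  by_cases hc : 97 ≤ c.toNat ∧ c.toNat ≤ 122
  · obtain ⟨h1, h2⟩ := hc
    have hof := Char.ofNat_toNat c
    interval_cases h : c.toNat <;>
      (rw [← hof]; rw [if_pos (by decide)]; exact congrArg (total + ·) (by decide))
  · rw [pvContains_false_of _ c ?_]
    · simp only [Bool.false_eq_true, if_false, pvVal, if_neg hc, add_zero]
    · intro p hp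
      have : 97 ≤ p.1.toNat ∧ p.1.toNat ≤ 122 := by fin_cases hp <;> decide
      omega

lemma pvA_eq_sum (txt : String) :
    how_many_clicks txt = (txt.toList.map pvVal).sum := by
  show (PySem.List.pyRange 0 (PySem.Str.len txt) 1).foldl
    (fun total i =>
      if pvClickVal.contains (PySem.List.pyGetD txt.toList i ' ') then
        total + pvClickVal.getD (PySem.List.pyGetD txt.toList i ' ') 0
      else total) 0 = (txt.toList.map pvVal).sum
  simp only [PySem.Str.len_eq]
  rw [PySem.List.foldl_pyRange_zero_pyGetD' txt.toList ' '
      (fun total c => if pvClickVal.contains c then total + pvClickVal.getD c 0 else total) 0]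
  simp only [pvStep]
  rw [PySem.List.foldl_add txt.toList pvVal 0]
  simp

lemma pvStepB (total : Int) (v : Int) (b : Prop) [Decidable b] :
    (if b then total + v else total) = total + (if b then v else 0) := by
  split_ifs <;> omega

lemma pvCharLe (c : Char) : ('a' ≤ c ∧ c ≤ 'z') ↔ (97 ≤ c.toNat ∧ c.toNat ≤ 122) := by
  constructor <;> intro h <;> exact ⟨h.1, h.2⟩

lemma pvB_eq_sum (txt : String) :
    how_many_clicks_alt txt = (txt.toList.map pvVal).sum := by
  show (txt.toList.foldl (fun d ch => d.insert ch (d.getD ch 0 + 1)) PySem.Dict.empty).items.foldl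
    (fun total p =>
      if 'a' ≤ p.1 ∧ p.1 ≤ 'z' then total + ((p.1.toNat : Int) - 96) * p.2 else total) 0
    = (txt.toList.map pvVal).sum
  rw [PySem.Dict.foldl_insert_getD_add_one_eq_counter, PySem.Dict.items_counter]
  simp only [pvStepB]
  rw [PySem.List.foldl_add _
      (fun p : Char × Int => if 'a' ≤ p.1 ∧ p.1 ≤ 'z' then ((p.1.toNat : Int) - 96) * p.2 else 0) 0]
  rw [List.map_map]
  have hmap : ((fun p : Char × Int => if 'a' ≤ p.1 ∧ p.1 ≤ 'z' then ((p.1.toNat : Int) - 96) * p.2 else 0)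
      ∘ (fun k : Char => (k, (txt.toList.count k : Int))))
      = fun k : Char => pvVal k * (txt.toList.count k : Int) := by
    funext k
    simp only [Function.comp, pvVal, pvCharLe k]
    split_ifs <;> simp
  rw [hmap]
  rw [zero_add]
  -- distinct-keys weighted sum = plain sum over the list
  have hnd : (PySem.Set.ofList txt.toList).Nodup := PySem.Set.nodup_ofList _
  have hfin : (PySem.Set.ofList txt.toList).toFinset = txt.toList.toFinset := by
    ext c
    simp [PySem.Set.mem_ofList]
  calc ((PySem.Set.ofList txt.toList).map (fun k => pvVal k * (txt.toList.count k : Int))).sum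
      = (PySem.Set.ofList txt.toList).toFinset.sum (fun k => pvVal k * (txt.toList.count k : Int)) :=
        (List.sum_toFinset _ hnd).symm
    _ = txt.toList.toFinset.sum (fun k => pvVal k * (txt.toList.count k : Int)) := by rw [hfin]
    _ = txt.toList.toFinset.sum (fun k => txt.toList.count k • pvVal k) := by
        refine Finset.sum_congr rfl fun k _ => ?_
        simp [mul_comm]
    _ = (txt.toList.map pvVal).sum := (Finset.sum_list_map_count _ _).symm

-- ===== VERDICT (by name: the statement is the Claim_ definition above) =====
theorem how_many_clicks_spec : Claim_equal_how_many_clicks := by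
  intro txt _
  unfold Spec_how_many_clicks
  rw [pvA_eq_sum, pvB_eq_sum]
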